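-- pv_equiv track=rewrite | github.com/oOtiti/Gecko-by-Python | LIB/gromhetool.py | haloic
-- ===== SOURCE A (Python) =====
-- def haloic(ng, group, bond):
--     haloica = 0
--     tempoh15 = 0
--     i = 0
--     k = 0
--
--     # start loop - search for carboxylic group
--     for i in range(1, ng + 1):
--         if 'CO(OH)' in group[i-1]:
--             tempoh15 = 0
--
--             # H-bond with a functional group on the alpha carbon
--             for k in range(1, ng + 1):
--                 if bond[i-1][k-1] != 0:
--                     if '(F)' in group[k-1]:
--                         tempoh15 += 1
--                     if '(Cl)' in group[k-1]:
--                         tempoh15 += 1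
--                     if '(Br)' in group[k-1]:
--                         tempoh15 += 1
--                     if '(I)' in group[k-1]:
--                         tempoh15 += 1
--
--             # increment is maximum 1 per CO(OH) (a given OH can only be involded in a
--             # single bond)
--             if tempoh15 > 0:
--                 haloica += 1
--
--     return haloica
-- ===== SOURCE B (Python) =====
-- def haloic(ng, group, bond):
--     # Invert the loop nesting: find halogen-labelled groups first, then collect
--     # the carboxylic groups bonded to any of them into a set.
--     satisfied = set()
--     for k in range(1, ng + 1):
--         g = group[k-1]
--         if '(F)' in g or '(Cl)' in g or '(Br)' in g or '(I)' in g: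
--             for i in range(1, ng + 1):
--                 if 'CO(OH)' in group[i-1] and bond[i-1][k-1] != 0:
--                     satisfied.add(i)
--     return len(satisfied)
-- ===== Notes on version B (the rewrite author's own statement) =====
-- stated objective: alternative
-- what changed: Inverted the loop nesting: B scans halogen-labelled groups in the outer loop and collects the indices of carboxylic groups bonded to any of them into a set, returning the set's size, instead of A's per-carboxylic inner scan with a counter thresholded by >0.
import Mathlib
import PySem

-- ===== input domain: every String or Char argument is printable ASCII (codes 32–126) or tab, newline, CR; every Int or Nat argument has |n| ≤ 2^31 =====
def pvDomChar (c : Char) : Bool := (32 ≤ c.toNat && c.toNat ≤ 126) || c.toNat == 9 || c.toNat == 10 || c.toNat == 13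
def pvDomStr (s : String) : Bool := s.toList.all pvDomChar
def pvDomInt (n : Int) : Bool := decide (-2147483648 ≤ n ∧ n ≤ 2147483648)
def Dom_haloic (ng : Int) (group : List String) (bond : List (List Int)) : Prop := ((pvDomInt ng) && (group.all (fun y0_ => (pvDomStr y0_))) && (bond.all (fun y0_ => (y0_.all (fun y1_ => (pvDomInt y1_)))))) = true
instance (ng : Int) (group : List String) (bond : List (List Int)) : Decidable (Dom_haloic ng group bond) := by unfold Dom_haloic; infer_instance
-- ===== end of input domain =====

-- B inverts the loop nesting (outer loop over halogen groups, set of satisfied carboxylic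
-- indices instead of a per-group counter); alternative decomposition, same asymptotic cost.


-- ===== PORT A =====
-- literal transliteration of A: outer loop over carboxylic candidates i, inner counter
-- tempoh15 over all k, +1 to haloica when tempoh15 > 0.  Indexing is total via pyGetD;
-- Pre_haloic states exactly where the Python performs only in-range accesses.
def haloic (ng : Int) (group : List String) (bond : List (List Int)) : Int :=
  (PySem.List.pyRange 1 (ng + 1) 1).foldl (fun haloica i =>
    if PySem.Str.isIn "CO(OH)" (PySem.List.pyGetD group (i - 1) "") then
      let tempoh15 : Int :=
        (PySem.List.pyRange 1 (ng + 1) 1).foldl (fun t k =>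
          if PySem.List.pyGetD (PySem.List.pyGetD bond (i - 1) []) (k - 1) 0 ≠ 0 then
            let t := if PySem.Str.isIn "(F)" (PySem.List.pyGetD group (k - 1) "") then t + 1 else t
            let t := if PySem.Str.isIn "(Cl)" (PySem.List.pyGetD group (k - 1) "") then t + 1 else t
            let t := if PySem.Str.isIn "(Br)" (PySem.List.pyGetD group (k - 1) "") then t + 1 else t
            let t := if PySem.Str.isIn "(I)" (PySem.List.pyGetD group (k - 1) "") then t + 1 else t
            t
          else t) 0
      if tempoh15 > 0 then haloica + 1 else haloica
    else haloica) 0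

-- ===== PORT B =====
-- literal transliteration of B (Source B): outer loop over halogen groups k, inner loop adds
-- every carboxylic i bonded to k into the set 'satisfied'; the answer is its size.
def haloic_alt (ng : Int) (group : List String) (bond : List (List Int)) : Int :=
  PySem.Set.len
    ((PySem.List.pyRange 1 (ng + 1) 1).foldl (fun satisfied k =>
      let g := PySem.List.pyGetD group (k - 1) ""
      if PySem.Str.isIn "(F)" g || PySem.Str.isIn "(Cl)" g ||
         PySem.Str.isIn "(Br)" g || PySem.Str.isIn "(I)" g then
        (PySem.List.pyRange 1 (ng + 1) 1).foldl (fun satisfied i =>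
          if PySem.Str.isIn "CO(OH)" (PySem.List.pyGetD group (i - 1) "") &&
             PySem.List.pyGetD (PySem.List.pyGetD bond (i - 1) []) (k - 1) 0 != 0 then
            PySem.Set.add satisfied i
          else satisfied) satisfied
      else satisfied) (PySem.Set.empty (α := Int)))

-- ===== PRECONDITION & SPEC =====
-- Pre_haloic is exactly the inputs where Python A raises no IndexError: every group index
-- 0..ng-1 exists, and every carboxylic group has a bond row of length ≥ ng.
def Pre_haloic (ng : Int) (group : List String) (bond : List (List Int)) : Prop :=
  ng ≤ (group.length : Int) ∧
  ∀ j ∈ List.range ng.toNat, PySem.Str.isIn "CO(OH)" (group.getD j "") = true →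
    j < bond.length ∧ ng ≤ ((bond.getD j []).length : Int)
instance (ng : Int) (group : List String) (bond : List (List Int)) : Decidable (Pre_haloic ng group bond) := by unfold Pre_haloic; infer_instance

def pvWitness_haloic : Int × List String × List (List Int) := (2, ["CO(OH)x", "(Cl)"], [[0, 1], [1, 0]])

def Spec_haloic (ng : Int) (group : List String) (bond : List (List Int)) (out : Int) : Prop := out = haloic_alt ng group bond
instance (ng : Int) (group : List String) (bond : List (List Int)) (out : Int) : Decidable (Spec_haloic ng group bond out) := by unfold Spec_haloic; infer_instance

-- ===== CLAIM (what is proved, stated in full; the proofs are below) =====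
def Claim_equal_haloic : Prop := ∀ (ng : Int) (group : List String) (bond : List (List Int)), Dom_haloic ng group bond → Pre_haloic ng group bond → Spec_haloic ng group bond (haloic ng group bond)

-- ===== LEMMAS AND PROOFS =====

-- shared abbreviations used only by the proofs
def pvCoh (group : List String) (i : Int) : Bool :=
  PySem.Str.isIn "CO(OH)" (PySem.List.pyGetD group (i - 1) "")
def pvHal (group : List String) (k : Int) : Bool :=
  PySem.Str.isIn "(F)" (PySem.List.pyGetD group (k - 1) "") ||
  PySem.Str.isIn "(Cl)" (PySem.List.pyGetD group (k - 1) "") ||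
  PySem.Str.isIn "(Br)" (PySem.List.pyGetD group (k - 1) "") ||
  PySem.Str.isIn "(I)" (PySem.List.pyGetD group (k - 1) "")
def pvBnz (bond : List (List Int)) (i k : Int) : Bool :=
  PySem.List.pyGetD (PySem.List.pyGetD bond (i - 1) []) (k - 1) 0 != 0
def pvP (ng : Int) (group : List String) (bond : List (List Int)) (i : Int) : Bool :=
  pvCoh group i &&
  (PySem.List.pyRange 1 (ng + 1) 1).any (fun k => pvHal group k && pvBnz bond i k)

-- per-k contribution of A's inner counter
def pvC (group : List String) (bond : List (List Int)) (i k : Int) : Int :=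
  if pvBnz bond i k then
    (if PySem.Str.isIn "(F)" (PySem.List.pyGetD group (k - 1) "") then (1:Int) else 0) +
    (if PySem.Str.isIn "(Cl)" (PySem.List.pyGetD group (k - 1) "") then (1:Int) else 0) +
    (if PySem.Str.isIn "(Br)" (PySem.List.pyGetD group (k - 1) "") then (1:Int) else 0) +
    (if PySem.Str.isIn "(I)" (PySem.List.pyGetD group (k - 1) "") then (1:Int) else 0)
  else 0

-- the fold bodies of the two ports, named (each bridge below is rfl)
def pvBodyAInner (group : List String) (bond : List (List Int)) (i t k : Int) : Int :=
  if PySem.List.pyGetD (PySem.List.pyGetD bond (i - 1) []) (k - 1) 0 ≠ 0 then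
    let t := if PySem.Str.isIn "(F)" (PySem.List.pyGetD group (k - 1) "") then t + 1 else t
    let t := if PySem.Str.isIn "(Cl)" (PySem.List.pyGetD group (k - 1) "") then t + 1 else t
    let t := if PySem.Str.isIn "(Br)" (PySem.List.pyGetD group (k - 1) "") then t + 1 else t
    let t := if PySem.Str.isIn "(I)" (PySem.List.pyGetD group (k - 1) "") then t + 1 else t
    t
  else t
def pvBodyAOuter (ng : Int) (group : List String) (bond : List (List Int)) (a i : Int) : Int :=
  if pvCoh group i then
    if (PySem.List.pyRange 1 (ng + 1) 1).foldl (pvBodyAInner group bond i) 0 > 0 then a + 1 else a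
  else a
def pvBodyBInner (group : List String) (bond : List (List Int)) (k : Int)
    (s : PySem.Set Int) (i : Int) : PySem.Set Int :=
  if pvCoh group i && pvBnz bond i k then PySem.Set.add s i else s
def pvBodyBOuter (ng : Int) (group : List String) (bond : List (List Int))
    (s : PySem.Set Int) (k : Int) : PySem.Set Int :=
  if pvHal group k then (PySem.List.pyRange 1 (ng + 1) 1).foldl (pvBodyBInner group bond k) s else s

theorem pv_A_def (ng : Int) (group : List String) (bond : List (List Int)) :
    haloic ng group bond
      = (PySem.List.pyRange 1 (ng + 1) 1).foldl (pvBodyAOuter ng group bond) 0 := rfl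

theorem pv_B_def (ng : Int) (group : List String) (bond : List (List Int)) :
    haloic_alt ng group bond
      = PySem.Set.len ((PySem.List.pyRange 1 (ng + 1) 1).foldl (pvBodyBOuter ng group bond)
          (PySem.Set.empty (α := Int))) := rfl

-- counting fold = countP
theorem pv_foldl_count (q : Int → Bool) (l : List Int) (s : Int) :
    l.foldl (fun a i => if q i then a + 1 else a) s = s + (l.countP q : Int) := by
  induction l generalizing s with
  | nil => simp
  | cons x xs ih =>
    simp only [List.foldl_cons, List.countP_cons]
    by_cases h : q x = true
    · simp [h, ih]; ring
    · simp [h, ih]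

theorem pvC_nonneg (group : List String) (bond : List (List Int)) (i k : Int) :
    0 ≤ pvC group bond i k := by
  unfold pvC; split_ifs <;> omega

theorem pvC_pos_iff (group : List String) (bond : List (List Int)) (i k : Int) :
    0 < pvC group bond i k ↔ (pvHal group k && pvBnz bond i k) = true := by
  unfold pvC pvHal
  by_cases h : pvBnz bond i k = true
  · simp only [h, if_pos]
    split_ifs <;> simp_all
  · simp [h]

theorem pv_sum_pos_iff (c : Int → Int) (h : ∀ k, 0 ≤ c k) (l : List Int) :
    0 < (l.map c).sum ↔ ∃ k ∈ l, 0 < c k := by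
  induction l with
  | nil => simp
  | cons x xs ih =>
    have hs : 0 ≤ (xs.map c).sum := List.sum_nonneg (by
      rintro y hy; simp only [List.mem_map] at hy; obtain ⟨a, _, rfl⟩ := hy; exact h a)
    have hx0 := h x
    simp only [List.map_cons, List.sum_cons, List.mem_cons]
    constructor
    · intro hpos
      by_cases hx : 0 < c x
      · exact ⟨x, Or.inl rfl, hx⟩
      · have : 0 < (xs.map c).sum := by omega
        obtain ⟨k, hk, hck⟩ := ih.mp this
        exact ⟨k, Or.inr hk, hck⟩
    · rintro ⟨k, (rfl | hk), hck⟩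
      · omega
      · have := ih.mpr ⟨k, hk, hck⟩; omega

theorem pv_bodyAInner_eq (group : List String) (bond : List (List Int)) (i t k : Int) :
    pvBodyAInner group bond i t k = t + pvC group bond i k := by
  unfold pvBodyAInner pvC pvBnz
  by_cases h : PySem.List.pyGetD (PySem.List.pyGetD bond (i - 1) []) (k - 1) 0 = 0
  · simp [h]
  · have hb : (PySem.List.pyGetD (PySem.List.pyGetD bond (i - 1) []) (k - 1) 0 != 0) = true := by
      simpa using h
    rw [if_pos hb, if_pos h]
    split_ifs <;> ring

theorem pv_inner_A (ng : Int) (group : List String) (bond : List (List Int)) (i : Int) :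
    (PySem.List.pyRange 1 (ng + 1) 1).foldl (pvBodyAInner group bond i) 0
      = ((PySem.List.pyRange 1 (ng + 1) 1).map (pvC group bond i)).sum := by
  have hf : pvBodyAInner group bond i = fun t k => t + pvC group bond i k := by
    funext t k; exact pv_bodyAInner_eq group bond i t k
  rw [hf, PySem.List.foldl_add]
  ring

theorem pv_A_eq (ng : Int) (group : List String) (bond : List (List Int)) :
    haloic ng group bond
      = ((PySem.List.pyRange 1 (ng + 1) 1).countP (pvP ng group bond) : Int) := by
  rw [pv_A_def]
  have hf : pvBodyAOuter ng group bond = fun a i => if pvP ng group bond i then a + 1 else a := by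
    funext a i
    unfold pvBodyAOuter pvP
    by_cases hc : pvCoh group i = true
    · rw [if_pos hc, pv_inner_A ng group bond i]
      have hiff := pv_sum_pos_iff (pvC group bond i) (pvC_nonneg group bond i)
        (PySem.List.pyRange 1 (ng + 1) 1)
      by_cases hp : ((PySem.List.pyRange 1 (ng + 1) 1).any fun k => pvHal group k && pvBnz bond i k) = true
      · have hpos : 0 < ((PySem.List.pyRange 1 (ng + 1) 1).map (pvC group bond i)).sum := by
          rw [hiff]
          obtain ⟨k, hk, hkk⟩ := List.any_eq_true.mp hp
          exact ⟨k, hk, (pvC_pos_iff group bond i k).mpr hkk⟩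
        rw [if_pos hpos, if_pos (by rw [Bool.and_eq_true]; exact ⟨hc, hp⟩)]
      · have hneg : ¬ 0 < ((PySem.List.pyRange 1 (ng + 1) 1).map (pvC group bond i)).sum := by
          rw [hiff]
          rintro ⟨k, hk, hck⟩
          exact hp (List.any_eq_true.mpr ⟨k, hk, (pvC_pos_iff group bond i k).mp hck⟩)
        rw [if_neg hneg, if_neg (by rw [Bool.and_eq_true]; rintro ⟨-, h2⟩; exact hp h2)]
    · rw [if_neg hc, if_neg (by rw [Bool.and_eq_true]; rintro ⟨h1, -⟩; exact hc h1)]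
  rw [hf, pv_foldl_count]
  ring

-- B's inner fold: membership and nodup
theorem pv_inner_B (group : List String) (bond : List (List Int)) (k : Int)
    (l : List Int) (s : PySem.Set Int) (hs : s.Nodup) :
    (l.foldl (pvBodyBInner group bond k) s).Nodup ∧
    ∀ x, x ∈ l.foldl (pvBodyBInner group bond k) s ↔
      x ∈ s ∨ (x ∈ l ∧ (pvCoh group x && pvBnz bond x k) = true) := by
  induction l generalizing s with
  | nil => simp [hs]
  | cons a as ih =>
    simp only [List.foldl_cons]
    by_cases h : (pvCoh group a && pvBnz bond a k) = true
    · rw [show pvBodyBInner group bond k s a = PySem.Set.add s a from by unfold pvBodyBInner; rw [if_pos h]]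
      obtain ⟨hn, hm⟩ := ih (PySem.Set.add s a) (PySem.Set.nodup_add s a hs)
      refine ⟨hn, fun x => ?_⟩
      rw [hm x, PySem.Set.mem_add]
      constructor
      · rintro ((hx | rfl) | ⟨hx, hq⟩)
        · exact Or.inl hx
        · exact Or.inr ⟨List.mem_cons_self, h⟩
        · exact Or.inr ⟨List.mem_cons_of_mem _ hx, hq⟩
      · rintro (hx | ⟨hx, hq⟩)
        · exact Or.inl (Or.inl hx)
        · rcases List.mem_cons.mp hx with rfl | hx
          · exact Or.inl (Or.inr rfl)
          · exact Or.inr ⟨hx, hq⟩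
    · rw [show pvBodyBInner group bond k s a = s from by unfold pvBodyBInner; rw [if_neg h]]
      obtain ⟨hn, hm⟩ := ih s hs
      refine ⟨hn, fun x => ?_⟩
      rw [hm x]
      constructor
      · rintro (hx | ⟨hx, hq⟩)
        · exact Or.inl hx
        · exact Or.inr ⟨List.mem_cons_of_mem _ hx, hq⟩
      · rintro (hx | ⟨hx, hq⟩)
        · exact Or.inl hx
        · rcases List.mem_cons.mp hx with rfl | hx
          · exact absurd hq h
          · exact Or.inr ⟨hx, hq⟩

-- B's outer fold: membership and nodup
theorem pv_outer_B (ng : Int) (group : List String) (bond : List (List Int))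
    (ks : List Int) (s : PySem.Set Int) (hs : s.Nodup) :
    (ks.foldl (pvBodyBOuter ng group bond) s).Nodup ∧
    ∀ x, x ∈ ks.foldl (pvBodyBOuter ng group bond) s ↔
      x ∈ s ∨ ∃ k ∈ ks, pvHal group k = true ∧ x ∈ PySem.List.pyRange 1 (ng + 1) 1 ∧
        (pvCoh group x && pvBnz bond x k) = true := by
  induction ks generalizing s with
  | nil => simp [hs]
  | cons a as ih =>
    simp only [List.foldl_cons]
    by_cases h : pvHal group a = true
    · rw [show pvBodyBOuter ng group bond s a
          = (PySem.List.pyRange 1 (ng + 1) 1).foldl (pvBodyBInner group bond a) s from by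
        unfold pvBodyBOuter; rw [if_pos h]]
      obtain ⟨hn1, hm1⟩ := pv_inner_B group bond a (PySem.List.pyRange 1 (ng + 1) 1) s hs
      obtain ⟨hn, hm⟩ := ih _ hn1
      refine ⟨hn, fun x => ?_⟩
      rw [hm x, hm1 x]
      constructor
      · rintro ((hx | ⟨hr, hq⟩) | ⟨k, hk, hhal, hr, hq⟩)
        · exact Or.inl hx
        · exact Or.inr ⟨a, List.mem_cons_self, h, hr, hq⟩
        · exact Or.inr ⟨k, List.mem_cons_of_mem _ hk, hhal, hr, hq⟩
      · rintro (hx | ⟨k, hk, hhal, hr, hq⟩)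
        · exact Or.inl (Or.inl hx)
        · rcases List.mem_cons.mp hk with rfl | hk
          · exact Or.inl (Or.inr ⟨hr, hq⟩)
          · exact Or.inr ⟨k, hk, hhal, hr, hq⟩
    · rw [show pvBodyBOuter ng group bond s a = s from by unfold pvBodyBOuter; rw [if_neg h]]
      obtain ⟨hn, hm⟩ := ih s hs
      refine ⟨hn, fun x => ?_⟩
      rw [hm x]
      constructor
      · rintro (hx | ⟨k, hk, hhal, hr, hq⟩)
        · exact Or.inl hx
        · exact Or.inr ⟨k, List.mem_cons_of_mem _ hk, hhal, hr, hq⟩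
      · rintro (hx | ⟨k, hk, hhal, hr, hq⟩)
        · exact Or.inl hx
        · rcases List.mem_cons.mp hk with rfl | hk
          · exact absurd hhal h
          · exact Or.inr ⟨k, hk, hhal, hr, hq⟩

theorem pv_B_eq (ng : Int) (group : List String) (bond : List (List Int)) :
    haloic_alt ng group bond
      = ((PySem.List.pyRange 1 (ng + 1) 1).countP (pvP ng group bond) : Int) := by
  rw [pv_B_def]
  obtain ⟨hn, hm⟩ := pv_outer_B ng group bond (PySem.List.pyRange 1 (ng + 1) 1)
      (PySem.Set.empty (α := Int)) (by simp [PySem.Set.empty])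
  have hperm : ((PySem.List.pyRange 1 (ng + 1) 1).foldl (pvBodyBOuter ng group bond)
        (PySem.Set.empty (α := Int))).Perm
      ((PySem.List.pyRange 1 (ng + 1) 1).filter (pvP ng group bond)) := by
    rw [List.perm_ext_iff_of_nodup hn (List.Nodup.filter _ (PySem.List.nodup_pyRange_one _ _))]
    intro x
    rw [hm x, List.mem_filter]
    simp only [PySem.Set.empty, List.not_mem_nil, false_or]
    unfold pvP
    constructor
    · rintro ⟨k, hk, hhal, hr, hq⟩
      rw [Bool.and_eq_true] at hq
      refine ⟨hr, ?_⟩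
      rw [Bool.and_eq_true]
      exact ⟨hq.1, List.any_eq_true.mpr ⟨k, hk, by rw [Bool.and_eq_true]; exact ⟨hhal, hq.2⟩⟩⟩
    · rintro ⟨hr, hq⟩
      rw [Bool.and_eq_true] at hq
      obtain ⟨hcoh, hany⟩ := hq
      obtain ⟨k, hk, hkq⟩ := List.any_eq_true.mp hany
      rw [Bool.and_eq_true] at hkq
      exact ⟨k, hk, hkq.1, hr, by rw [Bool.and_eq_true]; exact ⟨hcoh, hkq.2⟩⟩
  have hlen := hperm.length_eq
  rw [← List.countP_eq_length_filter] at hlen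
  simp only [PySem.Set.len, hlen]

-- ===== VERDICT (by name: the statement is the Claim_ definition above) =====
theorem haloic_spec : Claim_equal_haloic := by
  intro ng group bond _ _
  unfold Spec_haloic
  rw [pv_A_eq, pv_B_eq]
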